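-- pv_equiv track=rewrite | github.com/TheNityant/HABIT_TRACKER-Full-Stack-app- | CV_HACKATHON_MODEL_DATASET/MAIN_MODEL/DASHBOARD.py | classify_gene_type
-- ===== SOURCE A (Python) =====
-- def classify_gene_type(gene_name):
--     name = gene_name.lower()
--     if any(x in name for x in ['bla', 'ndm', 'kpc', 'oxa', 'ctx', 'vim']): return "Beta-Lactamase"
--     if 'tet' in name: return "Tetracycline Resistance"
--     if 'mec' in name: return "Methicillin Resistance"
--     if 'sul' in name: return "Sulfonamide Resistance"
--     if any(x in name for x in ['qnr', 'gyr', 'par']): return "Fluoroquinolone"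
--     if 'mcr' in name: return "Colistin Resistance"
--     if any(x in name for x in ['aac', 'ant', 'aph', 'aad']): return "Aminoglycoside"
--     return "Acquired Resistance Mechanism"
-- ===== SOURCE B (Python) =====
-- _TRI = {
--     'bla': (0, "Beta-Lactamase"), 'ndm': (0, "Beta-Lactamase"), 'kpc': (0, "Beta-Lactamase"),
--     'oxa': (0, "Beta-Lactamase"), 'ctx': (0, "Beta-Lactamase"), 'vim': (0, "Beta-Lactamase"),
--     'tet': (1, "Tetracycline Resistance"),
--     'mec': (2, "Methicillin Resistance"),
--     'sul': (3, "Sulfonamide Resistance"),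
--     'qnr': (4, "Fluoroquinolone"), 'gyr': (4, "Fluoroquinolone"), 'par': (4, "Fluoroquinolone"),
--     'mcr': (5, "Colistin Resistance"),
--     'aac': (6, "Aminoglycoside"), 'ant': (6, "Aminoglycoside"), 'aph': (6, "Aminoglycoside"), 'aad': (6, "Aminoglycoside"),
-- }
--
-- def classify_gene_type(gene_name):
--     s = gene_name.lower()
--     best = None
--     while s:
--         hit = _TRI.get(s[:3])
--         if hit is not None and (best is None or hit[0] < best[0]):
--             best = hit
--         s = s[1:]
--     return best[1] if best is not None else "Acquired Resistance Mechanism"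
-- ===== Notes on version B (the rewrite author's own statement) =====
-- stated objective: alternative
-- what changed: Replaced A's if-cascade of repeated substring searches by a single sliding-window pass: every pattern is 3 chars, so B scans the lowered name once, looks up each 3-char window in a trigram-to-(priority,label) dict, and returns the minimum-priority hit's label.
import Mathlib
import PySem

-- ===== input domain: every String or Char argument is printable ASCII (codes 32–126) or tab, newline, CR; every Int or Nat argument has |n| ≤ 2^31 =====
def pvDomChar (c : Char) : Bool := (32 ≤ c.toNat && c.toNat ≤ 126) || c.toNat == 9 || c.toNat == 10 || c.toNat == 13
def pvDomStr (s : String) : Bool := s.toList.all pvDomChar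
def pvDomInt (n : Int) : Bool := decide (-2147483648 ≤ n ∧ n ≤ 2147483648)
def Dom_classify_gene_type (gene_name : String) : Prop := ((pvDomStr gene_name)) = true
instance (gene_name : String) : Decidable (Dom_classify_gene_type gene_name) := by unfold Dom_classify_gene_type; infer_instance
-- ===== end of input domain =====

-- B replaces A's if-cascade of substring searches by one sliding-window pass over the lowered
-- name, looking each 3-char window up in a trigram table and keeping the minimum-priority hit
-- (objective: alternative algorithm).


-- ===== PORT A =====
def classify_gene_type (gene_name : String) : String :=
  let name := PySem.Str.lower gene_name
  if ["bla", "ndm", "kpc", "oxa", "ctx", "vim"].any (fun x => PySem.Str.isIn x name) then "Beta-Lactamase"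
  else if PySem.Str.isIn "tet" name then "Tetracycline Resistance"
  else if PySem.Str.isIn "mec" name then "Methicillin Resistance"
  else if PySem.Str.isIn "sul" name then "Sulfonamide Resistance"
  else if ["qnr", "gyr", "par"].any (fun x => PySem.Str.isIn x name) then "Fluoroquinolone"
  else if PySem.Str.isIn "mcr" name then "Colistin Resistance"
  else if ["aac", "ant", "aph", "aad"].any (fun x => PySem.Str.isIn x name) then "Aminoglycoside"
  else "Acquired Resistance Mechanism"

-- ===== PORT B =====
-- _TRI: trigram -> (priority, label); keys as char lists
def triTable : List (List Char × Nat × String) :=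
  [ ("bla".toList, 0, "Beta-Lactamase"), ("ndm".toList, 0, "Beta-Lactamase"),
    ("kpc".toList, 0, "Beta-Lactamase"), ("oxa".toList, 0, "Beta-Lactamase"),
    ("ctx".toList, 0, "Beta-Lactamase"), ("vim".toList, 0, "Beta-Lactamase"),
    ("tet".toList, 1, "Tetracycline Resistance"),
    ("mec".toList, 2, "Methicillin Resistance"),
    ("sul".toList, 3, "Sulfonamide Resistance"),
    ("qnr".toList, 4, "Fluoroquinolone"), ("gyr".toList, 4, "Fluoroquinolone"),
    ("par".toList, 4, "Fluoroquinolone"),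
    ("mcr".toList, 5, "Colistin Resistance"),
    ("aac".toList, 6, "Aminoglycoside"), ("ant".toList, 6, "Aminoglycoside"),
    ("aph".toList, 6, "Aminoglycoside"), ("aad".toList, 6, "Aminoglycoside") ]

-- _TRI.get(w) (keys are distinct, so first-match lookup = dict get)
def triFind (w : List Char) : Option (Nat × String) :=
  (triTable.find? (fun e => e.1 == w)).map (·.2)

-- the while loop: s shrinks by one char each iteration; hit = _TRI.get(s[:3])
def scanB : Option (Nat × String) → List Char → Option (Nat × String)
  | best, [] => best
  | best, c :: rest =>
      scanB
        (match triFind ((c :: rest).take 3) with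
         | none => best
         | some hit =>
             match best with
             | none => some hit
             | some b => if hit.1 < b.1 then some hit else best)
        rest

def classify_gene_type_alt (gene_name : String) : String :=
  match scanB none (PySem.Str.lower gene_name).toList with
  | some b => b.2
  | none => "Acquired Resistance Mechanism"

-- ===== PRECONDITION & SPEC =====
def Spec_classify_gene_type (gene_name : String) (out : String) : Prop := out = classify_gene_type_alt gene_name
instance (gene_name : String) (out : String) : Decidable (Spec_classify_gene_type gene_name out) := by unfold Spec_classify_gene_type; infer_instance

-- ===== CLAIM (what is proved, stated in full; the proofs are below) =====
def Claim_equal_classify_gene_type : Prop := ∀ (gene_name : String), Dom_classify_gene_type gene_name → Spec_classify_gene_type gene_name (classify_gene_type gene_name)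

-- ===== LEMMAS AND PROOFS =====

-- the label of each priority group
def glabel : Nat → String
  | 0 => "Beta-Lactamase"
  | 1 => "Tetracycline Resistance"
  | 2 => "Methicillin Resistance"
  | 3 => "Sulfonamide Resistance"
  | 4 => "Fluoroquinolone"
  | 5 => "Colistin Resistance"
  | 6 => "Aminoglycoside"
  | _ => ""

-- the trigrams of each priority group
def pats : Nat → List (List Char)
  | 0 => ["bla".toList, "ndm".toList, "kpc".toList, "oxa".toList, "ctx".toList, "vim".toList]
  | 1 => ["tet".toList]
  | 2 => ["mec".toList]
  | 3 => ["sul".toList]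
  | 4 => ["qnr".toList, "gyr".toList, "par".toList]
  | 5 => ["mcr".toList]
  | 6 => ["aac".toList, "ant".toList, "aph".toList, "aad".toList]
  | _ => []

-- group p has a hit in cs
def grpHit (p : Nat) (cs : List Char) : Prop := ∃ t ∈ pats p, t <:+: cs

-- combine two candidate hits: the left (earlier) one wins ties
def hmerge : Option (Nat × String) → Option (Nat × String) → Option (Nat × String)
  | b, none => b
  | none, some h => some h
  | some b, some h => if h.1 < b.1 then some h else some b

-- minimum-priority hit of all windows of cs
def bestHit : List Char → Option (Nat × String)
  | [] => none
  | c :: rest => hmerge (triFind ((c :: rest).take 3)) (bestHit rest)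

lemma hmerge_assoc (a b c : Option (Nat × String)) :
    hmerge (hmerge a b) c = hmerge a (hmerge b c) := by
  rcases a with _ | a <;> rcases b with _ | b <;> rcases c with _ | c <;>
    simp only [hmerge] <;> (try split_ifs) <;>
    first
      | rfl
      | (exfalso; omega)
      | (simp only [hmerge]; split_ifs <;> first | rfl | (exfalso; omega))

lemma scanB_eq (cs : List Char) : ∀ best, scanB best cs = hmerge best (bestHit cs) := by
  induction cs with
  | nil => intro best; cases best <;> rfl
  | cons c rest ih =>
      intro best
      have step : scanB best (c :: rest)
          = scanB (hmerge best (triFind ((c :: rest).take 3))) rest := by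
        rw [scanB]
        cases triFind ((c :: rest).take 3) <;> cases best <;> simp only [hmerge]
      rw [step, ih, bestHit, ← hmerge_assoc]

lemma triFind_mem {w : List Char} {h : Nat × String} (hf : triFind w = some h) :
    (w, h) ∈ triTable := by
  unfold triFind at hf
  rcases Option.map_eq_some_iff.mp hf with ⟨e, he, rfl⟩
  have hm := List.mem_of_find?_eq_some he
  have hp := List.find?_some he
  have : e.1 = w := by simpa using hp
  simpa [← this] using hm

lemma table_shape {w : List Char} {h : Nat × String} (hm : (w, h) ∈ triTable) :
    w.length = 3 ∧ h.2 = glabel h.1 ∧ h.1 ≤ 6 ∧ w ∈ pats h.1 := by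
  simp [triTable] at hm
  rcases hm with ⟨rfl, rfl⟩ | ⟨rfl, rfl⟩ | ⟨rfl, rfl⟩ | ⟨rfl, rfl⟩ | ⟨rfl, rfl⟩ | ⟨rfl, rfl⟩ |
    ⟨rfl, rfl⟩ | ⟨rfl, rfl⟩ | ⟨rfl, rfl⟩ | ⟨rfl, rfl⟩ | ⟨rfl, rfl⟩ | ⟨rfl, rfl⟩ | ⟨rfl, rfl⟩ |
    ⟨rfl, rfl⟩ | ⟨rfl, rfl⟩ | ⟨rfl, rfl⟩ | ⟨rfl, rfl⟩ <;> refine ⟨by decide, by decide, by decide, by decide⟩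

lemma pats_triFind {p : Nat} {t : List Char} (hp : p ≤ 6) (ht : t ∈ pats p) :
    triFind t = some (p, glabel p) ∧ t.length = 3 := by
  interval_cases p <;> simp [pats] at ht <;> rcases ht with rfl | rfl | rfl | rfl | rfl | rfl <;>
    exact ⟨by decide, by decide⟩

lemma pats_le {p : Nat} {t : List Char} (ht : t ∈ pats p) : p ≤ 6 := by
  by_contra h
  obtain ⟨k, rfl⟩ : ∃ k, p = k + 7 := ⟨p - 7, by omega⟩
  simp [pats] at ht

-- soundness: a best hit is a real group hit with the right label
lemma bestHit_sound {cs : List Char} {h : Nat × String} (hb : bestHit cs = some h) :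
    h.2 = glabel h.1 ∧ h.1 ≤ 6 ∧ grpHit h.1 cs := by
  induction cs with
  | nil => simp [bestHit] at hb
  | cons c rest ih =>
      rw [bestHit] at hb
      rcases ht : triFind ((c :: rest).take 3) with _ | h0 <;>
        rcases hr : bestHit rest with _ | h' <;> rw [ht, hr] at hb
      · simp [hmerge] at hb
      · simp [hmerge] at hb; subst hb
        obtain ⟨l1, l2, t, htm, hinf⟩ := ih hr
        exact ⟨l1, l2, t, htm, hinf.trans (List.suffix_cons c rest).isInfix⟩
      · simp [hmerge] at hb; subst hb
        obtain ⟨hl, hlab, hle, hmem⟩ := table_shape (triFind_mem ht)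
        refine ⟨hlab, hle, _, hmem, ?_⟩
        exact ((c :: rest).take_prefix 3).isInfix
      · have hone : h = h0 ∨ h = h' := by
          simp [hmerge] at hb; split_ifs at hb <;> simp_all [eq_comm]
        rcases hone with rfl | rfl
        · obtain ⟨hl, hlab, hle, hmem⟩ := table_shape (triFind_mem ht)
          exact ⟨hlab, hle, _, hmem, ((c :: rest).take_prefix 3).isInfix⟩
        · obtain ⟨l1, l2, t, htm, hinf⟩ := ih hr
          exact ⟨l1, l2, t, htm, hinf.trans (List.suffix_cons c rest).isInfix⟩

-- minimality, window form
lemma bestHit_min_at {cs : List Char} {i : Nat} {h : Nat × String}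
    (ht : triFind ((cs.drop i).take 3) = some h) :
    ∃ h', bestHit cs = some h' ∧ h'.1 ≤ h.1 := by
  induction cs generalizing i with
  | nil =>
      simp only [List.drop_nil, List.take_nil,
        show triFind ([] : List Char) = none from by decide] at ht
      cases ht
  | cons c rest ih =>
      cases i with
      | zero =>
          simp only [List.drop_zero] at ht
          rcases hr : bestHit rest with _ | h' <;> rw [bestHit, ht, hr]
          · exact ⟨h, rfl, le_refl _⟩
          · simp only [hmerge]
            split_ifs with hlt
            · exact ⟨h', rfl, by omega⟩
            · exact ⟨h, rfl, le_refl _⟩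
      | succ j =>
          have hd : (c :: rest).drop (j + 1) = rest.drop j := rfl
          rw [hd] at ht
          obtain ⟨h', hb, hle⟩ := ih ht
          rcases h0 : triFind ((c :: rest).take 3) with _ | hh <;> rw [bestHit, h0, hb]
          · exact ⟨h', rfl, hle⟩
          · simp only [hmerge]
            split_ifs with hlt
            · exact ⟨h', rfl, hle⟩
            · exact ⟨hh, rfl, by omega⟩

-- minimality: any group hit bounds the best hit's priority
lemma bestHit_min {cs : List Char} {q : Nat} (hq : grpHit q cs) :
    ∃ h', bestHit cs = some h' ∧ h'.1 ≤ q := by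
  obtain ⟨t, htm, hinf⟩ := hq
  have hq6 : q ≤ 6 := pats_le htm
  obtain ⟨hfind, hlen⟩ := pats_triFind hq6 htm
  obtain ⟨s, r, hsr⟩ := hinf
  have hwin : (cs.drop s.length).take 3 = t := by
    subst hsr
    rw [List.append_assoc, List.drop_left, ← hlen, List.take_left]
  obtain ⟨h', hb, hle⟩ := bestHit_min_at (by rw [hwin, hfind])
  exact ⟨h', hb, by simpa using hle⟩

-- A's seven boolean conditions, indexed (proof-side view of the cascade)
def condA : Nat → String → Bool
  | 0, name => ["bla", "ndm", "kpc", "oxa", "ctx", "vim"].any (fun x => PySem.Str.isIn x name)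
  | 1, name => PySem.Str.isIn "tet" name
  | 2, name => PySem.Str.isIn "mec" name
  | 3, name => PySem.Str.isIn "sul" name
  | 4, name => ["qnr", "gyr", "par"].any (fun x => PySem.Str.isIn x name)
  | 5, name => PySem.Str.isIn "mcr" name
  | 6, name => ["aac", "ant", "aph", "aad"].any (fun x => PySem.Str.isIn x name)
  | _, _ => false

-- bridge: A's boolean conditions are exactly the group-hit predicates
lemma condA_iff (name : String) (p : Nat) (hp : p ≤ 6) :
    condA p name = true ↔ grpHit p name.toList := by
  unfold grpHit
  interval_cases p <;> simp [condA, pats, PySem.Chars.isIn_iff_infix]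

lemma A_as_cascade (gene_name : String) :
    classify_gene_type gene_name =
      (let name := PySem.Str.lower gene_name
       if condA 0 name then glabel 0 else if condA 1 name then glabel 1 else
       if condA 2 name then glabel 2 else if condA 3 name then glabel 3 else
       if condA 4 name then glabel 4 else if condA 5 name then glabel 5 else
       if condA 6 name then glabel 6 else "Acquired Resistance Mechanism") := rfl

theorem classify_eq (gene_name : String) :
    classify_gene_type gene_name = classify_gene_type_alt gene_name := by
  rw [A_as_cascade]
  show (if condA 0 (PySem.Str.lower gene_name) then glabel 0 else _) = _
  rcases hbest : bestHit (PySem.Str.lower gene_name).toList with _ | h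
  · -- no window hits: every condition is false, both sides give the default
    have hno : ∀ p, p ≤ 6 → condA p (PySem.Str.lower gene_name) = false := by
      intro p hp
      cases hcp : condA p (PySem.Str.lower gene_name) with
      | false => rfl
      | true =>
          obtain ⟨h', hb, _⟩ := bestHit_min ((condA_iff _ p hp).mp hcp)
          rw [hbest] at hb
          cases hb
    have hB : classify_gene_type_alt gene_name = "Acquired Resistance Mechanism" := by
      unfold classify_gene_type_alt
      rw [scanB_eq, hbest]
      rfl
    rw [hB]
    simp only [hno 0 (by omega), hno 1 (by omega), hno 2 (by omega), hno 3 (by omega),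
      hno 4 (by omega), hno 5 (by omega), hno 6 (by omega), Bool.false_eq_true,
      if_false]
  · -- some hit: h = (p, glabel p); conditions below p are false, condition p is true
    obtain ⟨hlab, hle, hhit⟩ := bestHit_sound hbest
    have hB : classify_gene_type_alt gene_name = h.2 := by
      unfold classify_gene_type_alt
      rw [scanB_eq, hbest]
      rfl
    rw [hB]
    have hcp : condA h.1 (PySem.Str.lower gene_name) = true :=
      (condA_iff _ h.1 hle).mpr hhit
    have hlt : ∀ q, q < h.1 → condA q (PySem.Str.lower gene_name) = false := by
      intro q hq
      cases hcq : condA q (PySem.Str.lower gene_name) with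
      | false => rfl
      | true =>
          obtain ⟨h', hb, hle'⟩ := bestHit_min ((condA_iff _ q (by omega)).mp hcq)
          rw [hbest] at hb
          injection hb with hb'
          subst hb'
          omega
    rcases h with ⟨p, lab⟩
    simp only at hcp hlt hlab hle ⊢
    subst hlab
    interval_cases p
    · simp [hcp]
    · simp [hcp, hlt 0 (by omega)]
    · simp [hcp, hlt 0 (by omega), hlt 1 (by omega)]
    · simp [hcp, hlt 0 (by omega), hlt 1 (by omega), hlt 2 (by omega)]
    · simp [hcp, hlt 0 (by omega), hlt 1 (by omega), hlt 2 (by omega), hlt 3 (by omega)]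
    · simp [hcp, hlt 0 (by omega), hlt 1 (by omega), hlt 2 (by omega), hlt 3 (by omega),
        hlt 4 (by omega)]
    · simp [hcp, hlt 0 (by omega), hlt 1 (by omega), hlt 2 (by omega), hlt 3 (by omega),
        hlt 4 (by omega), hlt 5 (by omega)]

-- ===== VERDICT (by name: the statement is the Claim_ definition above) =====
theorem classify_gene_type_spec : Claim_equal_classify_gene_type := by
  intro g _
  exact classify_eq g
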